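-- pv_equiv track=rewrite | github.com/kvnmasterevans/celdt | rowUtilsNew.py | _findXPattern
-- ===== SOURCE A (Python) =====
-- def _findXPattern(xVals, columnREdge):
--     pattern = []
--     for i in range(1, len(xVals)):
--         xDiff = xVals[i] - xVals[i-1]
--         pattern.append(xDiff)
--         if i == len(xVals) - 1: # if final value append distance to column edge
--             columnDiff = columnREdge - xVals[i]
--             pattern.append(columnDiff)
--     return pattern
-- ===== SOURCE B (Python) =====
-- def _findXPattern(xVals, columnREdge):
--     if len(xVals) < 2:
--         return []
--     rev = []
--     prev = columnREdge
--     for x in reversed(xVals):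
--         rev.append(prev - x)
--         prev = x
--     rev.reverse()
--     return rev
-- ===== Notes on version B (the rewrite author's own statement) =====
-- stated objective: alternative
-- what changed: B traverses the list right-to-left carrying the right neighbour (seeded with the column edge), builds the result back-to-front and reverses it, instead of A's forward indexed loop with a last-iteration special case.
import Mathlib
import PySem

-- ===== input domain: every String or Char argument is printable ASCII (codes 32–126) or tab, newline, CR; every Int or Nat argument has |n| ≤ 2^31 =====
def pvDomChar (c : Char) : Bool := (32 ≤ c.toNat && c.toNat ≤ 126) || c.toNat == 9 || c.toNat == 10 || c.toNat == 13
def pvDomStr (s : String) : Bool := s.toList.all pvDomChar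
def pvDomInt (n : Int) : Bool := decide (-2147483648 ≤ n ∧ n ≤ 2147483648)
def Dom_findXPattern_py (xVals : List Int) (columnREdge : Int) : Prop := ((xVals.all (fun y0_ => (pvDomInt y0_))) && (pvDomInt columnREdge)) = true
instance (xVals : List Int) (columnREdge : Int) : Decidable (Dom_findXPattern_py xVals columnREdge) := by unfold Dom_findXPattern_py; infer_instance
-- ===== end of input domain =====

-- B traverses the list right-to-left carrying the right neighbour (seeded with the column edge),
-- building the result back-to-front and reversing it, instead of A's forward indexed loop with a
-- last-iteration special case (objective: alternative).

-- ===== PORT A =====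
def findXPattern_py (xVals : List Int) (columnREdge : Int) : List Int :=
  (PySem.List.pyRange 1 xVals.length 1).foldl
    (fun pattern i =>
      let xDiff := PySem.List.pyGetD xVals i 0 - PySem.List.pyGetD xVals (i - 1) 0
      let pattern := pattern ++ [xDiff]
      if i = (xVals.length : Int) - 1 then
        pattern ++ [columnREdge - PySem.List.pyGetD xVals i 0]
      else pattern) []

-- ===== PORT B =====
def findXPattern_py_alt (xVals : List Int) (columnREdge : Int) : List Int :=
  if xVals.length < 2 then []
  else
    -- 'for x in reversed(xVals): rev.append(prev - x); prev = x' with state (prev, rev)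
    let st := xVals.reverse.foldl
      (fun (s : Int × List Int) x => (x, s.2 ++ [s.1 - x])) (columnREdge, [])
    st.2.reverse

-- ===== PRECONDITION & SPEC =====
def Spec_findXPattern_py (xVals : List Int) (columnREdge : Int) (out : List Int) : Prop := out = findXPattern_py_alt xVals columnREdge
instance (xVals : List Int) (columnREdge : Int) (out : List Int) : Decidable (Spec_findXPattern_py xVals columnREdge out) := by unfold Spec_findXPattern_py; infer_instance

-- ===== CLAIM (what is proved, stated in full; the proofs are below) =====
def Claim_equal_findXPattern_py : Prop := ∀ (xVals : List Int) (columnREdge : Int), Dom_findXPattern_py xVals columnREdge → Spec_findXPattern_py xVals columnREdge (findXPattern_py xVals columnREdge)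

-- ===== LEMMAS AND PROOFS =====

-- Inner consecutive differences of a list.
def pvIdiff : List Int → List Int
  | [] => []
  | [_] => []
  | a :: b :: t => (b - a) :: pvIdiff (b :: t)

-- Consecutive differences of the list extended by the edge value e at the right end.
def pvPdiff : List Int → Int → List Int
  | [], _ => []
  | [a], e => [e - a]
  | a :: b :: t, e => (b - a) :: pvPdiff (b :: t) e

-- The sequence (p - x0), (x0 - x1), … produced by B's backward loop.
def pvChain : Int → List Int → List Int
  | _, [] => []
  | p, x :: t => (p - x) :: pvChain x t

theorem pvChain_foldl (l : List Int) (p : Int) (acc : List Int) :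
    (l.foldl (fun (s : Int × List Int) x => (x, s.2 ++ [s.1 - x])) (p, acc)).2 =
      acc ++ pvChain p l := by
  induction l generalizing p acc with
  | nil => simp [pvChain]
  | cons x t ih => simp [pvChain, ih]

theorem pvPdiff_append_last (ys : List Int) (z e : Int) :
    pvPdiff (ys ++ [z]) e = pvPdiff ys z ++ [e - z] := by
  induction ys with
  | nil => simp [pvPdiff]
  | cons a t ih =>
    cases t with
    | nil => simp [pvPdiff]
    | cons b t' => simpa [pvPdiff] using ih

theorem pvChain_reverse (l : List Int) (e : Int) :
    (pvChain e l).reverse = pvPdiff l.reverse e := by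
  induction l generalizing e with
  | nil => simp [pvChain, pvPdiff]
  | cons x t ih => simp [pvChain, ih, pvPdiff_append_last]

theorem pvPdiff_eq_idiff (xs : List Int) (h : xs ≠ []) (e : Int) :
    pvPdiff xs e = pvIdiff xs ++ [e - xs.getLast h] := by
  induction xs with
  | nil => exact absurd rfl h
  | cons a t ih =>
    cases t with
    | nil => simp [pvPdiff, pvIdiff]
    | cons b t' => simp [pvPdiff, pvIdiff, ih]

-- Nat-indexed consecutive differences over List.range equal pvIdiff.
theorem pvRangeMap_eq_idiff (xs : List Int) :
    (List.range (xs.length - 1)).map (fun k => xs.getD (k + 1) 0 - xs.getD k 0) = pvIdiff xs := by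
  induction xs with
  | nil => simp [pvIdiff]
  | cons a t ih =>
    cases t with
    | nil => simp [pvIdiff]
    | cons b t' =>
      have hlen : (a :: b :: t').length - 1 = t'.length + 1 := by simp
      rw [hlen, List.range_succ_eq_map, List.map_cons, List.map_map]
      have h1 : ((a :: b :: t').getD (0 + 1) 0 - (a :: b :: t').getD 0 0) = b - a := by simp
      have h2 : (List.range t'.length).map
          ((fun k => (a :: b :: t').getD (k + 1) 0 - (a :: b :: t').getD k 0) ∘ Nat.succ) =
          (List.range t'.length).map (fun k => (b :: t').getD (k + 1) 0 - (b :: t').getD k 0) := by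
        apply List.map_congr_left
        intro k _
        simp
      rw [h1, h2]
      have hlen' : (b :: t').length - 1 = t'.length := by simp
      rw [hlen'] at ih
      rw [ih]
      rfl

-- A's indexed map over range(1, len) equals the Nat-indexed differences.
theorem pvMap_diff_eq_idiff (xs : List Int) :
    (PySem.List.pyRange 1 (xs.length : Int) 1).map
      (fun i => PySem.List.pyGetD xs i 0 - PySem.List.pyGetD xs (i - 1) 0) = pvIdiff xs := by
  rw [PySem.List.pyRange_one, List.map_map]
  have harg : ((xs.length : Int) - 1).toNat = xs.length - 1 := by omega
  rw [harg]
  rw [← pvRangeMap_eq_idiff xs]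
  apply List.map_congr_left
  intro k _
  show PySem.List.pyGetD xs (1 + (k : Int)) 0 - PySem.List.pyGetD xs (1 + (k : Int) - 1) 0 = _
  have e1 : (1 + (k : Int)) = ((k + 1 : Nat) : Int) := by push_cast; ring
  have e2 : ((k + 1 : Nat) : Int) - 1 = ((k : Nat) : Int) := by push_cast; ring
  rw [e1, e2, PySem.List.pyGetD_natCast, PySem.List.pyGetD_natCast]

-- A flatMap whose pieces are singletons is a map.
theorem pvFlatMap_eq_map {α β : Type} (l : List α) (f : α → List β) (g : α → β)
    (h : ∀ i ∈ l, f i = [g i]) : l.flatMap f = l.map g := by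
  induction l with
  | nil => simp
  | cons a t ih =>
    simp only [List.flatMap_cons, List.map_cons, h a (by simp)]
    rw [ih (fun i hi => h i (by simp [hi]))]
    simp

-- A's loop accumulates by appending; rewrite the foldl as a flatMap of the per-step pieces.
theorem pvA_eq_flatMap (xVals : List Int) (columnREdge : Int) :
    findXPattern_py xVals columnREdge =
      (PySem.List.pyRange 1 xVals.length 1).flatMap
        (fun i =>
          [PySem.List.pyGetD xVals i 0 - PySem.List.pyGetD xVals (i - 1) 0] ++
            (if i = (xVals.length : Int) - 1 then
              [columnREdge - PySem.List.pyGetD xVals i 0] else [])) := by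
  unfold findXPattern_py
  have h : ∀ (l init : List Int),
      l.foldl (fun pattern i =>
        let xDiff := PySem.List.pyGetD xVals i 0 - PySem.List.pyGetD xVals (i - 1) 0
        let pattern := pattern ++ [xDiff]
        if i = (xVals.length : Int) - 1 then
          pattern ++ [columnREdge - PySem.List.pyGetD xVals i 0]
        else pattern) init =
        init ++ l.flatMap (fun i =>
          [PySem.List.pyGetD xVals i 0 - PySem.List.pyGetD xVals (i - 1) 0] ++
            (if i = (xVals.length : Int) - 1 then
              [columnREdge - PySem.List.pyGetD xVals i 0] else [])) := by
    intro l
    induction l with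
    | nil => intro init; simp
    | cons a t ih =>
      intro init
      simp only [List.foldl_cons, List.flatMap_cons, ih]
      split <;> simp
  simpa using h _ []

-- ===== VERDICT =====
theorem findXPattern_py_spec : Claim_equal_findXPattern_py := by
  intro xVals columnREdge _
  show findXPattern_py xVals columnREdge = findXPattern_py_alt xVals columnREdge
  rw [pvA_eq_flatMap]
  unfold findXPattern_py_alt
  by_cases hlen : xVals.length < 2
  · rw [if_pos hlen]
    have h0 : PySem.List.pyRange 1 xVals.length 1 = [] :=
      PySem.List.pyRange_one_eq_nil (by omega)
    simp [h0]
  · rw [if_neg hlen]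
    rw [Nat.not_lt] at hlen
    have hne : xVals ≠ [] := List.ne_nil_of_length_pos (by omega)
    -- B = pvPdiff xVals columnREdge
    have hB : (xVals.reverse.foldl
        (fun (s : Int × List Int) x => (x, s.2 ++ [s.1 - x])) (columnREdge, [])).2.reverse =
        pvPdiff xVals columnREdge := by
      rw [pvChain_foldl, List.nil_append, pvChain_reverse, List.reverse_reverse]
    rw [hB]
    set n := xVals.length with hn
    -- split the range at its last index n-1
    have hsplit : PySem.List.pyRange 1 (n : Int) 1 =
        PySem.List.pyRange 1 ((n : Int) - 1) 1 ++ [(n : Int) - 1] := by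
      have := PySem.List.pyRange_one_succ_right (a := 1) (b := (n : Int) - 1) (by omega)
      simpa using this
    rw [hsplit, List.flatMap_append]
    have hfirst : (PySem.List.pyRange 1 ((n : Int) - 1) 1).flatMap
        (fun i =>
          [PySem.List.pyGetD xVals i 0 - PySem.List.pyGetD xVals (i - 1) 0] ++
            (if i = (n : Int) - 1 then
              [columnREdge - PySem.List.pyGetD xVals i 0] else [])) =
        (PySem.List.pyRange 1 ((n : Int) - 1) 1).map
          (fun i => PySem.List.pyGetD xVals i 0 - PySem.List.pyGetD xVals (i - 1) 0) := by
      have h1 : ∀ i ∈ PySem.List.pyRange 1 ((n : Int) - 1) 1,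
          ([PySem.List.pyGetD xVals i 0 - PySem.List.pyGetD xVals (i - 1) 0] ++
            (if i = (n : Int) - 1 then
              [columnREdge - PySem.List.pyGetD xVals i 0] else [])) =
          [PySem.List.pyGetD xVals i 0 - PySem.List.pyGetD xVals (i - 1) 0] := by
        intro i hi
        have := (PySem.List.mem_pyRange_one).1 hi
        rw [if_neg (by omega)]
        simp
      exact pvFlatMap_eq_map _ _ _ h1
    rw [hfirst]
    simp only [List.flatMap_cons, List.flatMap_nil, List.append_nil, if_true]
    -- recombine map over range 1 (n-1) with the diff at n-1 into the full map
    have hrecomb :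
        (PySem.List.pyRange 1 ((n : Int) - 1) 1).map
          (fun i => PySem.List.pyGetD xVals i 0 - PySem.List.pyGetD xVals (i - 1) 0) ++
        ([PySem.List.pyGetD xVals ((n : Int) - 1) 0 -
            PySem.List.pyGetD xVals ((n : Int) - 1 - 1) 0] ++
          [columnREdge - PySem.List.pyGetD xVals ((n : Int) - 1) 0]) =
        (PySem.List.pyRange 1 (n : Int) 1).map
          (fun i => PySem.List.pyGetD xVals i 0 - PySem.List.pyGetD xVals (i - 1) 0) ++
          [columnREdge - PySem.List.pyGetD xVals ((n : Int) - 1) 0] := by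
      rw [hsplit, List.map_append]
      simp
    rw [hrecomb, pvMap_diff_eq_idiff]
    -- the last element: xVals[n-1] = getLast
    have hlast : PySem.List.pyGetD xVals ((n : Int) - 1) 0 = xVals.getLast hne := by
      have e1 : ((n : Int) - 1) = ((n - 1 : Nat) : Int) := by omega
      rw [e1, PySem.List.pyGetD_natCast]
      rw [List.getD_eq_getElem _ _ (by omega), List.getLast_eq_getElem]
    rw [hlast, pvPdiff_eq_idiff xVals hne columnREdge]
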